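-- pv_equiv track=rewrite | github.com/Byeong-soo/Algorithm | test/K/fourth.py | solution
-- ===== SOURCE A (Python) =====
-- def solution(S):
--     search_list = list(S)
--     search_dic = {}
--     max_distance = -1
--
--     for i in range(len(search_list) - 1):
--         if search_list[i] + search_list[i + 1] in search_dic.keys():
--             search_dic[search_list[i] + search_list[i + 1]] += [i]
--         else:
--             search_dic[search_list[i] + search_list[i + 1]] = [i]
--
--     for value in search_dic.values():
--         if len(value) > 1:
--             distance = max(value) - min(value)
--             if max_distance < distance:
--                 max_distance = distance
--
--     return max_distance
-- ===== SOURCE B (Python) =====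
-- def solution(S):
--     # Brute force, no dict: for each adjacent pair, its gap to the pair's first
--     # occurrence found by a plain list search; a pair that never repeats gives 0.
--     pairs = [S[i] + S[i + 1] for i in range(len(S) - 1)]
--     gaps = [i - pairs.index(p) for i, p in enumerate(pairs)]
--     best = max(gaps, default=0)
--     return best if best > 0 else -1
-- ===== Notes on version B (the rewrite author's own statement) =====
-- stated objective: simpler
-- what changed: B drops A's dict entirely: instead of grouping all occurrence indices per pair and scanning the dict for max(list)-min(list), it builds the list of adjacent pairs and takes max over i - pairs.index(p) (gap to the pair's first occurrence found by plain list search), returning -1 when that max is 0.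
import Mathlib
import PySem

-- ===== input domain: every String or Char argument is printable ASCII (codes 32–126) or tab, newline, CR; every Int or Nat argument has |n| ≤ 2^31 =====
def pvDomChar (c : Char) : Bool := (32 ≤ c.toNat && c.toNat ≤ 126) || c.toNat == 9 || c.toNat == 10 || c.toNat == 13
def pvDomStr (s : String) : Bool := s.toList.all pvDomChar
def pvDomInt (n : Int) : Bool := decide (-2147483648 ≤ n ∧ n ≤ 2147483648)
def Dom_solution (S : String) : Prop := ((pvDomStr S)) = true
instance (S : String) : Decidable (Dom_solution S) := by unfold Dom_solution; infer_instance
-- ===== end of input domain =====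

-- B replaces A's dict of per-pair index lists (grouping pass + dict-scanning pass) by a
-- brute-force list search: each pair's gap to its first occurrence via pairs.index (simpler).

-- ===== PORT A =====
-- the adjacent pair search_list[i] + search_list[i+1], as its list of code points
-- (indices are always in range since i ∈ range(len-1); the pyGetD default is never used);
-- both Pythons form this same two-char string, so both ports share this helper
def pvKey (cs : List Char) (i : Int) : List Char :=
  [PySem.List.pyGetD cs i ' ', PySem.List.pyGetD cs (i + 1) ' ']

-- first loop body: if key in dic: dic[key] += [i] else dic[key] = [i]
def stepA (cs : List Char) (d : PySem.Dict (List Char) (List Int)) (i : Int) :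
    PySem.Dict (List Char) (List Int) :=
  if d.contains (pvKey cs i) then d.insert (pvKey cs i) (d.getD (pvKey cs i) [] ++ [i])
  else d.insert (pvKey cs i) [i]

-- second loop body (max(value)/min(value) are only read when len(value) > 1, so the
-- Option default 0 is never used)
def finishA (m : Int) (v : List Int) : Int :=
  if 1 < v.length then
    let distance := (PySem.List.max? v (fun x => x)).getD 0 - (PySem.List.min? v (fun x => x)).getD 0
    if m < distance then distance else m
  else m

def solution (S : String) : Int :=
  let cs := S.toList
  let d := (PySem.List.pyRange 0 ((cs.length : Int) - 1) 1).foldl (stepA cs) ⟨[]⟩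
  d.values.foldl finishA (-1)

-- ===== PORT B =====
-- pairs = [S[i] + S[i + 1] for i in range(len(S) - 1)]
def pvPairs (cs : List Char) : List (List Char) :=
  (PySem.List.pyRange 0 ((cs.length : Int) - 1) 1).map (pvKey cs)

-- i - pairs.index(p)  (pairs.index always succeeds: p occurs at i, so the getD 0 default is never used)
def pvGapF (ks : List (List Char)) (ip : Int × List Char) : Int :=
  ip.1 - (((PySem.List.index? ks ip.2).getD 0 : Nat) : Int)

-- gaps = [i - pairs.index(p) for i, p in enumerate(pairs)]
def pvGaps (ks : List (List Char)) : List Int :=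
  (PySem.List.enumerate ks).map (pvGapF ks)

def solution_alt (S : String) : Int :=
  let pairs := pvPairs S.toList
  let best := PySem.List.maxD (pvGaps pairs) (fun x => x) 0
  if 0 < best then best else -1

-- ===== PRECONDITION & SPEC =====
def Spec_solution (S : String) (out : Int) : Prop := out = solution_alt S
instance (S : String) (out : Int) : Decidable (Spec_solution S out) := by unfold Spec_solution; infer_instance

-- ===== CLAIM (what is proved, stated in full; the proofs are below) =====
def Claim_equal_solution : Prop := ∀ (S : String), Dom_solution S → Spec_solution S (solution S)

-- ===== LEMMAS AND PROOFS =====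

-- PROOF-ONLY intermediate program: one pass keeping each pair's first index and a running
-- max; A is shown equal to it (loop_eq), and it is shown equal to B (part2).
def stepM (st : PySem.Dict (List Char) Int × Int) : Int × List Char → PySem.Dict (List Char) Int × Int
  | (i, k) =>
    match st.1.get? k with
    | some j => (st.1, if st.2 < i - j then i - j else st.2)
    | none => (st.1.insert k i, st.2)

-- the loop invariant tying A's dict of index lists to the mid program's dict of first
-- indices and running max; b bounds every index stored so far
def pvInv (dA : List (List Char × List Int)) (dB : List (List Char × Int)) (m b : Int) : Prop :=
  dB = dA.map (fun p => (p.1, p.2.headD 0))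
  ∧ (dA.map Prod.fst).Nodup
  ∧ (∀ p ∈ dA, p.2 ≠ [] ∧ p.2.Pairwise (· < ·) ∧ ∀ x ∈ p.2, x < b)
  ∧ m = (dA.map Prod.snd).foldl finishA (-1)
  ∧ -1 ≤ m

-- contribution of one value list to A's second loop
def contrib (v : List Int) : Int :=
  if 1 < v.length then (PySem.List.max? v (fun x => x)).getD 0 - (PySem.List.min? v (fun x => x)).getD 0
  else -1

lemma finishA_eq_max (m : Int) (v : List Int) (hm : -1 ≤ m) :
    finishA m v = max m (contrib v) := by
  simp only [finishA, contrib]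
  split_ifs <;> omega

lemma foldl_finishA_eq_max (vs : List (List Int)) (m : Int) (hm : -1 ≤ m) :
    vs.foldl finishA m = (vs.map contrib).foldl max m := by
  induction vs generalizing m with
  | nil => rfl
  | cons v t ih =>
    simp only [List.foldl_cons, List.map_cons]
    rw [finishA_eq_max m v hm, ih _ (le_trans hm (le_max_left _ _))]

lemma foldl_max_out (L : List Int) (m x : Int) :
    L.foldl max (max m x) = max (L.foldl max m) x := by
  induction L generalizing m with
  | nil => rfl
  | cons y t ih =>
    simp only [List.foldl_cons]
    rw [max_right_comm m x y, ih]

lemma foldl_max_middle (L1 L2 : List Int) (m a b : Int) (hab : a ≤ b) :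
    (L1 ++ b :: L2).foldl max m = max ((L1 ++ a :: L2).foldl max m) b := by
  induction L1 generalizing m with
  | nil =>
    simp only [List.nil_append, List.foldl_cons]
    have : max m b = max (max m a) b := by omega
    rw [this, foldl_max_out]
  | cons x t ih =>
    simp only [List.cons_append, List.foldl_cons]
    exact ih _

lemma min_of_sorted (h : Int) (t : List Int) (hp : (h :: t).Pairwise (· < ·)) :
    PySem.List.min? (h :: t) (fun x => x) = some h := by
  rw [PySem.List.min?_id_cons]
  rcases PySem.List.foldl_min_mem t h with he | hmem
  · rw [he]
  · have h1 := (PySem.List.foldl_min_le t h).1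
    have h2 := (List.pairwise_cons.mp hp).1 _ hmem
    omega

lemma max_append_big (v : List Int) (i : Int) (hv : ∀ x ∈ v, x < i) :
    PySem.List.max? (v ++ [i]) (fun x => x) = some i := by
  cases hM : PySem.List.max? (v ++ [i]) (fun x => x) with
  | none => simp [PySem.List.max?_eq_none_iff] at hM
  | some M =>
    have hmem := PySem.List.max?_mem hM
    have hle := PySem.List.max?_isMax hM i (by simp)
    rcases List.mem_append.mp hmem with hvm | hi
    · exact absurd hle (not_le.mpr (hv M hvm))
    · simp at hi
      rw [hi]

lemma contrib_append (h : Int) (t : List Int) (i : Int)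
    (hp : (h :: t).Pairwise (· < ·)) (hb : ∀ x ∈ h :: t, x < i) :
    contrib ((h :: t) ++ [i]) = i - h := by
  have hmin : PySem.List.min? ((h :: t) ++ [i]) (fun x => x) = some h := by
    rw [List.cons_append, PySem.List.min?_id_cons]
    rcases PySem.List.foldl_min_mem (t ++ [i]) h with he | hmem
    · rw [he]
    · have h1 := (PySem.List.foldl_min_le (t ++ [i]) h).1
      rcases List.mem_append.mp hmem with hm | hm
      · have := (List.pairwise_cons.mp hp).1 _ hm; omega
      · simp only [List.mem_singleton] at hm
        have := hb h (by simp); omega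
  have hmax := max_append_big (h :: t) i hb
  simp only [contrib, hmax, hmin, Option.getD_some]
  rw [if_pos (by simp)]

lemma contrib_le (h : Int) (t : List Int) (i : Int)
    (hp : (h :: t).Pairwise (· < ·)) (hb : ∀ x ∈ h :: t, x < i) :
    contrib (h :: t) ≤ i - h := by
  by_cases hl : 1 < (h :: t).length
  · have hmin := min_of_sorted h t hp
    cases hM : PySem.List.max? (h :: t) (fun x => x) with
    | none => simp [PySem.List.max?_eq_none_iff] at hM
    | some M =>
      have hMi := hb M (PySem.List.max?_mem hM)
      simp only [contrib, if_pos hl, hM, hmin, Option.getD_some]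
      omega
  · simp only [contrib, if_neg hl]
    have := hb h (by simp)
    omega

lemma step_preserve (cs : List Char) (dA : List (List Char × List Int))
    (dB : List (List Char × Int)) (m b i : Int) (h : pvInv dA dB m b) (hbi : b ≤ i) :
    pvInv (stepA cs ⟨dA⟩ i).items ((stepM (⟨dB⟩, m) (i, pvKey cs i)).1).items
      ((stepM (⟨dB⟩, m) (i, pvKey cs i)).2) (i + 1) := by
  obtain ⟨hmap, hnd, hent, hm, hm1⟩ := h
  set k := pvKey cs i with hk
  have hgetB : PySem.Dict.get? (⟨dB⟩ : PySem.Dict (List Char) Int) k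
      = (List.find? (fun p => p.1 == k) dA).map (fun p => p.2.headD 0) := by
    show Option.map (fun p => p.2) (List.find? (fun p => p.1 == k) dB) = _
    rw [hmap, List.find?_map, Option.map_map]
    rfl
  have hcontB : ((⟨dB⟩ : PySem.Dict (List Char) Int).contains k) = dA.any (fun p => p.1 == k) := by
    show dB.any (fun p => p.1 == k) = _
    rw [hmap, List.any_map]
    rfl
  cases hfind : List.find? (fun p => p.1 == k) dA with
  | none =>
    have hno : ∀ p ∈ dA, ¬ (p.1 == k) = true := List.find?_eq_none.mp hfind
    have hnotany : dA.any (fun p => p.1 == k) = false := by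
      rw [List.any_eq_false]; exact hno
    have hA : (stepA cs ⟨dA⟩ i).items = dA ++ [(k, [i])] := by
      simp only [stepA, ← hk, PySem.Dict.contains, PySem.Dict.insert]
      simp [hnotany]
    have hB : stepM (⟨dB⟩, m) (i, k) = (⟨dB ++ [(k, i)]⟩, m) := by
      simp only [stepM]
      rw [hgetB, hfind]
      simp only [Option.map_none, PySem.Dict.insert, hcontB, hnotany, Bool.false_eq_true,
        if_false]
    rw [hB, hA]
    refine ⟨?_, ?_, ?_, ?_, hm1⟩
    · rw [hmap]; simp
    · simp only [List.map_append, List.map_cons, List.map_nil]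
      rw [List.nodup_append]
      refine ⟨hnd, List.nodup_singleton _, ?_⟩
      intro a ha b' hb'
      obtain ⟨p, hp, rfl⟩ := List.mem_map.mp ha
      have hbk : b' = k := by simpa using hb'
      subst hbk
      exact fun hc => hno p hp (by simp [hc])
    · intro p hp
      rcases List.mem_append.mp hp with hp | hp
      · obtain ⟨h1, h2, h3⟩ := hent p hp
        exact ⟨h1, h2, fun x hx => by have := h3 x hx; omega⟩
      · simp only [List.mem_singleton] at hp
        subst hp
        exact ⟨by simp, List.pairwise_singleton _ _, by intro x hx; simp at hx; omega⟩
    · rw [hm]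
      simp only [List.map_append, List.map_cons, List.map_nil, List.foldl_append,
        List.foldl_cons, List.foldl_nil]
      simp [finishA]
  | some p0 =>
    obtain ⟨hpred, P, Q, hdec, hPno⟩ := List.find?_eq_some_iff_append.mp hfind
    obtain ⟨k0, v⟩ := p0
    have hk0 : k0 = k := by simpa using hpred
    subst hk0
    have hmemA : (k, v) ∈ dA := by
      rw [hdec]; exact List.mem_append_right _ (List.mem_cons_self)
    obtain ⟨hvne, hvpw, hvbd⟩ := hent _ hmemA
    obtain ⟨h0, t, rfl⟩ : ∃ h0 t, v = h0 :: t := by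
      cases v with
      | nil => exact absurd rfl hvne
      | cons a b => exact ⟨a, b, rfl⟩
    have hvlt : ∀ x ∈ h0 :: t, x < i := fun x hx => by have := hvbd x hx; omega
    have hQno : ∀ a ∈ Q, (a.1 == k) = false := by
      rw [hdec] at hnd
      simp only [List.map_append, List.map_cons, List.nodup_append] at hnd
      intro a ha
      have := hnd.2.2
      by_contra hc
      simp only [Bool.not_eq_false, beq_iff_eq] at hc
      exact (List.nodup_cons.mp hnd.2.1).1 (hc ▸ List.mem_map_of_mem ha)
    have hany : dA.any (fun p => p.1 == k) = true :=
      List.any_eq_true.mpr ⟨(k, h0 :: t), hmemA, by simp⟩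
    have hget : PySem.Dict.get? (⟨dA⟩ : PySem.Dict (List Char) (List Int)) k = some (h0 :: t) := by
      show Option.map (fun p => p.2) (List.find? (fun p => p.1 == k) dA) = _
      rw [hfind]; rfl
    have hA : (stepA cs ⟨dA⟩ i).items = P ++ (k, (h0 :: t) ++ [i]) :: Q := by
      simp only [stepA, ← hk, PySem.Dict.contains, PySem.Dict.insert, PySem.Dict.getD, hget]
      simp only [hany, if_true, Option.getD_some]
      show dA.map _ = _
      rw [hdec, List.map_append, List.map_cons]
      congr 1
      · conv_rhs => rw [← List.map_id P]
        apply List.map_congr_left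
        intro a ha
        rw [if_neg (by simpa using hPno a ha), id]
      · congr 1
        · simp
        · conv_rhs => rw [← List.map_id Q]
          apply List.map_congr_left
          intro a ha
          rw [if_neg (by simp [hQno a ha]), id]
    have hB : stepM (⟨dB⟩, m) (i, k)
        = (⟨dB⟩, if m < i - h0 then i - h0 else m) := by
      simp only [stepM]
      rw [hgetB, hfind]
      rfl
    rw [hB, hA]
    refine ⟨?_, ?_, ?_, ?_, ?_⟩
    · rw [hmap, hdec]; simp
    · show ((P ++ (k, (h0 :: t) ++ [i]) :: Q).map Prod.fst).Nodup
      rw [hdec] at hnd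
      simpa using hnd
    · intro p hp
      rcases List.mem_append.mp hp with hp | hp
      · obtain ⟨h1, h2, h3⟩ := hent p (by rw [hdec]; exact List.mem_append_left _ hp)
        exact ⟨h1, h2, fun x hx => by have := h3 x hx; omega⟩
      · rcases List.mem_cons.mp hp with rfl | hp
        · refine ⟨by simp, ?_, ?_⟩
          · rw [List.pairwise_append]
            exact ⟨hvpw, List.pairwise_singleton _ _,
              fun a ha b' hb' => by simp at hb'; subst hb'; exact hvlt a ha⟩
          · intro x hx
            rcases List.mem_append.mp hx with hx | hx
            · have := hvlt x hx; omega
            · simp at hx; omega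
        · obtain ⟨h1, h2, h3⟩ := hent p (by rw [hdec]; exact List.mem_append_right _ (List.mem_cons_of_mem _ hp))
          exact ⟨h1, h2, fun x hx => by have := h3 x hx; omega⟩
    · show (if m < i - h0 then i - h0 else m)
        = ((P ++ (k, (h0 :: t) ++ [i]) :: Q).map Prod.snd).foldl finishA (-1)
      rw [List.map_append, List.map_cons]
      rw [foldl_finishA_eq_max _ _ (le_refl (-1))]
      rw [List.map_append, List.map_cons]
      rw [contrib_append h0 t i hvpw hvlt]
      rw [foldl_max_middle _ _ _ (contrib (h0 :: t)) _ (contrib_le h0 t i hvpw hvlt)]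
      have hfold : (List.foldl max (-1)
          (List.map contrib (List.map Prod.snd P)
            ++ contrib (h0 :: t) :: List.map contrib (List.map Prod.snd Q))) = m := by
        rw [hm, hdec]
        simp only [List.map_append, List.map_cons]
        rw [foldl_finishA_eq_max _ _ (le_refl (-1))]
        simp only [List.map_append, List.map_cons]
      rw [hfold]
      split_ifs <;> omega
    · split_ifs <;> omega

lemma loop_eq (cs : List Char) (L : List Int) :
    ∀ (dA : List (List Char × List Int)) (dB : List (List Char × Int)) (m b : Int),
    pvInv dA dB m b → (∀ i ∈ L, b ≤ i) → L.Pairwise (· < ·) →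
    ((L.map (fun i => (i, pvKey cs i))).foldl stepM (⟨dB⟩, m)).2
      = (L.foldl (stepA cs) ⟨dA⟩).values.foldl finishA (-1) := by
  induction L with
  | nil =>
    intro dA dB m b hInv _ _
    simp only [List.map_nil, List.foldl_nil]
    exact hInv.2.2.2.1
  | cons i L ih =>
    intro dA dB m b hInv hball hpw
    simp only [List.map_cons, List.foldl_cons]
    have hstep := step_preserve cs dA dB m b i hInv (hball i (by simp))
    exact ih ((stepA cs ⟨dA⟩ i).items) (((stepM (⟨dB⟩, m) (i, pvKey cs i)).1).items)
      ((stepM (⟨dB⟩, m) (i, pvKey cs i)).2) (i + 1) hstep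
      (fun j hj => by have := (List.pairwise_cons.mp hpw).1 j hj; omega)
      (List.pairwise_cons.mp hpw).2

-- bridge: enumerating the mapped range pairs each index with its key
lemma enum_map_pyRange {K : Type} (f : Int → K) (a b : Int) :
    PySem.List.enumerate ((PySem.List.pyRange a b).map f) a
      = (PySem.List.pyRange a b).map (fun i => (i, f i)) := by
  by_cases hab : a < b
  · have hn : (b - a).toNat ≠ 0 := by omega
    suffices H : ∀ n a, (b - a).toNat = n →
        PySem.List.enumerate ((PySem.List.pyRange a b).map f) a
          = (PySem.List.pyRange a b).map (fun i => (i, f i)) from H _ a rfl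
    intro n
    induction n with
    | zero =>
      intro a ha
      have hba : b ≤ a := by omega
      have : PySem.List.pyRange a b = [] := by
        apply List.eq_nil_iff_forall_not_mem.mpr
        intro x hx
        have := PySem.List.mem_pyRange_one.mp hx
        omega
      simp [this]
    | succ n ih =>
      intro a ha
      by_cases h : a < b
      · rw [PySem.List.pyRange_one_cons h]
        simp only [List.map_cons, PySem.List.enumerate_cons]
        rw [ih (a + 1) (by omega)]
      · have : PySem.List.pyRange a b = [] := by
          apply List.eq_nil_iff_forall_not_mem.mpr
          intro x hx
          have := PySem.List.mem_pyRange_one.mp hx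
          omega
        simp [this]
  · have : PySem.List.pyRange a b = [] := by
      apply List.eq_nil_iff_forall_not_mem.mpr
      intro x hx
      have := PySem.List.mem_pyRange_one.mp hx
      omega
    simp [this]

-- appending one key does not move earlier first occurrences
lemma index?_append_one {α : Type} [BEq α] [LawfulBEq α] (pre : List α) (k k' : α)
    (h : k ∈ pre ∨ k' ≠ k) :
    PySem.List.index? (pre ++ [k]) k' = PySem.List.index? pre k' := by
  by_cases hmem : k' ∈ pre
  · exact PySem.List.index?_append_of_mem _ hmem
  · have hne : k' ≠ k := by
      rcases h with h | h
      · intro he; exact hmem (he ▸ h)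
      · exact h
    rw [(PySem.List.index?_eq_none_iff _ _).mpr hmem,
      (PySem.List.index?_eq_none_iff _ _).mpr (by simp [hmem, hne])]

-- running best over the gaps of a processed prefix
def pvBest (ks pre : List (List Char)) : Int :=
  ((PySem.List.enumerate pre).map (pvGapF ks)).foldl max 0

lemma pvBest_nonneg (ks pre : List (List Char)) : 0 ≤ pvBest ks pre :=
  (PySem.List.le_foldl_max _ 0).1

lemma pvBest_append (ks pre : List (List Char)) (k : List Char) :
    pvBest ks (pre ++ [k]) = max (pvBest ks pre) (pvGapF ks ((pre.length : Int), k)) := by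
  unfold pvBest
  rw [PySem.List.enumerate_append]
  simp only [PySem.List.enumerate_cons, PySem.List.enumerate_nil, List.map_append,
    List.map_cons, List.map_nil, List.foldl_append, List.foldl_cons, List.foldl_nil,
    zero_add]

-- mid program = B, by induction on the unprocessed suffix of the pair list
lemma part2 (ks : List (List Char)) :
    ∀ (suf pre : List (List Char)), ks = pre ++ suf →
    ∀ (d : PySem.Dict (List Char) Int) (m : Int),
    (∀ k, d.get? k = (PySem.List.index? pre k).map (fun n => (n : Int))) →
    ((pvBest ks pre = 0 ∧ m = -1) ∨ (0 < pvBest ks pre ∧ m = pvBest ks pre)) →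
    ((PySem.List.enumerate suf (pre.length : Int)).foldl stepM (d, m)).2
      = (if 0 < pvBest ks ks then pvBest ks ks else -1) := by
  intro suf
  induction suf with
  | nil =>
    intro pre hks d m hd hm
    have hpre : pre = ks := by simpa using hks.symm
    subst hpre
    simp only [PySem.List.enumerate_nil, List.foldl_nil]
    rcases hm with ⟨h0, rfl⟩ | ⟨h0, rfl⟩
    · rw [h0]; simp
    · rw [if_pos h0]
  | cons k rest ih =>
    intro pre hks d m hd hm
    rw [PySem.List.enumerate_cons, List.foldl_cons]
    have hks' : ks = (pre ++ [k]) ++ rest := by rw [hks]; simp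
    have hlen : (((pre ++ [k]).length : Nat) : Int) = (pre.length : Int) + 1 := by
      simp
    cases hidx : PySem.List.index? pre k with
    | none =>
      have hknotin : k ∉ pre := (PySem.List.index?_eq_none_iff pre k).mp hidx
      have hstep : stepM (d, m) ((pre.length : Int), k) = (d.insert k (pre.length : Int), m) := by
        simp only [stepM]
        rw [hd k, hidx]
        rfl
      rw [hstep]
      have hidxks : PySem.List.index? ks k = some pre.length := by
        rw [hks]
        exact (PySem.List.index?_eq_some_iff _ _ _).mpr ⟨pre, rest, rfl, rfl, hknotin⟩
      have hgap : pvGapF ks ((pre.length : Int), k) = 0 := by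
        simp only [pvGapF]
        rw [hidxks]
        simp
      have hbest' : pvBest ks (pre ++ [k]) = pvBest ks pre := by
        rw [pvBest_append, hgap]
        have := pvBest_nonneg ks pre
        omega
      have := ih (pre ++ [k]) hks' (d.insert k (pre.length : Int)) m ?_ ?_
      · rw [hlen] at this
        exact this
      · intro k'
        by_cases hk' : k' = k
        · subst hk'
          rw [PySem.Dict.get?_insert_self,
            PySem.List.index?_append_singleton_self pre k' hknotin]
          rfl
        · rw [PySem.Dict.get?_insert_of_ne _ _ hk', hd k',
            index?_append_one pre k k' (Or.inr hk')]
      · rw [hbest']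
        exact hm
    | some j =>
      obtain ⟨hj, hkj, hfirst⟩ := PySem.List.getElem_of_index?_eq_some hidx
      have hkin : k ∈ pre := hkj ▸ List.getElem_mem hj
      have hstep : stepM (d, m) ((pre.length : Int), k)
          = (d, if m < (pre.length : Int) - (j : Int) then (pre.length : Int) - (j : Int) else m) := by
        simp only [stepM]
        rw [hd k, hidx]
        rfl
      rw [hstep]
      have hidxks : PySem.List.index? ks k = some j := by
        rw [hks, PySem.List.index?_append_of_mem _ hkin, hidx]
      have hgap : pvGapF ks ((pre.length : Int), k) = (pre.length : Int) - (j : Int) := by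
        simp only [pvGapF]
        rw [hidxks]
        simp
      have hgap1 : 1 ≤ (pre.length : Int) - (j : Int) := by
        have : j < pre.length := hj
        omega
      have hbest' : pvBest ks (pre ++ [k]) = max (pvBest ks pre) ((pre.length : Int) - (j : Int)) := by
        rw [pvBest_append, hgap]
      have := ih (pre ++ [k]) hks' d
        (if m < (pre.length : Int) - (j : Int) then (pre.length : Int) - (j : Int) else m) ?_ ?_
      · rw [hlen] at this
        exact this
      · intro k'
        rw [hd k', index?_append_one pre k k' (Or.inl hkin)]
      · right
        rw [hbest']
        rcases hm with ⟨h0, rfl⟩ | ⟨h0, rfl⟩ <;>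
          constructor <;> first | (split_ifs <;> omega) | omega

-- B's max(gaps, default=0) equals the running best over the whole pair list
lemma maxD_gaps_eq (ks : List (List Char)) :
    PySem.List.maxD (pvGaps ks) (fun x => x) 0 = pvBest ks ks := by
  cases hks : ks with
  | nil => simp [pvGaps, pvBest, PySem.List.maxD, PySem.List.max?, PySem.List.enumerate_nil]
  | cons h t =>
    have hgap0 : pvGapF ks (0, h) = 0 := by
      simp only [pvGapF]
      rw [hks, PySem.List.index?_cons_self]
      simp
    have hg : pvGaps ks = 0 :: (PySem.List.enumerate t 1).map (pvGapF ks) := by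
      simp only [pvGaps, hks, PySem.List.enumerate_cons, List.map_cons, zero_add]
      rw [← hks, hgap0]
    have hb : pvBest ks ks = ((PySem.List.enumerate t 1).map (pvGapF ks)).foldl max 0 := by
      conv_lhs => rw [pvBest, hks]
      simp only [PySem.List.enumerate_cons, List.map_cons, List.foldl_cons, zero_add]
      rw [← hks, hgap0, max_self]
    rw [← hks, hg, hb]
    have : PySem.List.maxD (0 :: (PySem.List.enumerate t 1).map (pvGapF ks)) (fun x => x) 0
        = (PySem.List.max? (0 :: (PySem.List.enumerate t 1).map (pvGapF ks)) (fun x => x)).getD 0 := by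
      simp only [PySem.List.maxD, PySem.List.max?, List.foldl_cons]
    rw [this, PySem.List.max?_id_cons, Option.getD_some]

-- ===== VERDICT (by name: the statement is the Claim_ definition above) =====
theorem solution_spec : Claim_equal_solution := by
  intro S _
  unfold Spec_solution
  have hA : solution S
      = (((PySem.List.pyRange 0 ((S.toList.length : Int) - 1) 1).map
          (fun i => (i, pvKey S.toList i))).foldl stepM
            ((⟨[]⟩ : PySem.Dict (List Char) Int), -1)).2 := by
    unfold solution
    exact (loop_eq S.toList _ [] [] (-1) 0
      ⟨rfl, List.nodup_nil, by simp, rfl, le_refl _⟩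
      (fun i hi => (PySem.List.mem_pyRange_one.mp hi).1)
      (PySem.List.pairwise_lt_pyRange_one _ _)).symm
  have hglue : PySem.List.enumerate (pvPairs S.toList) 0
      = (PySem.List.pyRange 0 ((S.toList.length : Int) - 1) 1).map
          (fun i => (i, pvKey S.toList i)) := by
    unfold pvPairs
    exact enum_map_pyRange (pvKey S.toList) 0 _
  have hmid := part2 (pvPairs S.toList) (pvPairs S.toList) [] rfl
    (⟨[]⟩ : PySem.Dict (List Char) Int) (-1)
    (fun k => rfl)
    (Or.inl ⟨by simp [pvBest, PySem.List.enumerate_nil], rfl⟩)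
  simp only [List.length_nil, Nat.cast_zero] at hmid
  rw [hA, ← hglue, hmid, ← maxD_gaps_eq]
  rfl
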